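-- pv_equiv track=rewrite | github.com/mohammadfaiizan/ProjectI | DSA/Problem/Queue_Stack/06_Advanced_Queue_Applications/649_Dota2_Senate.py | predictPartyVictory_circular_queue
-- ===== SOURCE A (Python) =====
-- def predictPartyVictory_circular_queue(senate: str) -> str:
--     """
--     Approach 3: Circular Queue
--
--     Use circular queue to handle the round-based nature.
--
--     Time: O(n), Space: O(n)
--     """
--     from collections import deque
--
--     queue = deque(senate)
--     radiant_count = senate.count('R')
--     dire_count = senate.count('D')
--
--     radiant_floating_bans = 0
--     dire_floating_bans = 0
--
--     while radiant_count > 0 and dire_count > 0: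
--         current = queue.popleft()
--
--         if current == 'R':
--             if dire_floating_bans > 0:
--                 # This Radiant is banned
--                 dire_floating_bans -= 1
--                 radiant_count -= 1
--             else:
--                 # This Radiant survives and bans a Dire
--                 radiant_floating_bans += 1
--                 queue.append('R')
--         else:  # current == 'D'
--             if radiant_floating_bans > 0:
--                 # This Dire is banned
--                 radiant_floating_bans -= 1
--                 dire_count -= 1
--             else:
--                 # This Dire survives and bans a Radiant
--                 dire_floating_bans += 1
--                 queue.append('D')
--
--     return "Radiant" if radiant_count > 0 else "Dire"
-- ===== SOURCE B (Python) =====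
-- def predictPartyVictory_circular_queue(senate: str) -> str:
--     alive = list(senate)
--     while 'R' in alive and 'D' in alive:
--         head = alive.pop(0)
--         alive.remove('D' if head == 'R' else 'R')
--         alive.append(head)
--     return "Radiant" if 'R' in alive else "Dire"
-- ===== Notes on version B (the rewrite author's own statement) =====
-- stated objective: simpler
-- what changed: Replaces the deque-plus-four-counters simulation (party counts and two floating-ban counters, bans applied lazily when a banned senator is popped) by a direct simulation on the list of alive senators: the front senator immediately removes the nearest opposite-party senator and moves to the back, so no counts or pending-ban state is maintained.
-- outside the precondition, e.g. on predictPartyVictory_circular_queue('RXRDD'): A returns 'Radiant', B returns 'Dire'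
import Mathlib
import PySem

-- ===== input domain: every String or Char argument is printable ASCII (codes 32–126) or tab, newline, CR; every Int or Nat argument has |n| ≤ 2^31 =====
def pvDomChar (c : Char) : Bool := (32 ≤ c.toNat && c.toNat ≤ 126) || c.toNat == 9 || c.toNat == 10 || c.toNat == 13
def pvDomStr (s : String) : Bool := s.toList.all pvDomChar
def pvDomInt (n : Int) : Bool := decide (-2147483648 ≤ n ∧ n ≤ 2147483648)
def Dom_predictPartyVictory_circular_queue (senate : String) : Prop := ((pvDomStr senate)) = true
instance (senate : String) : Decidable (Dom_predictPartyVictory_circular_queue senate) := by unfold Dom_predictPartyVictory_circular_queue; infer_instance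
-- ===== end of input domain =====

-- B replaces A's deque-with-floating-ban-counters simulation by a direct simulation on the
-- list of alive senators (the front senator removes the nearest opposite-party senator and
-- goes to the back); objective: simpler.  Equal on Pre_ (senates made of the two party
-- letters only, or strings in which one of the two parties does not occur).

-- ===== PORT A =====
-- A's while loop.  The fuel argument only makes the recursion structural: starting from the
-- initial call below, every iteration decreases 2*|queue| - (rf+df) by exactly one, so the
-- loop runs at most 2*len(senate) iterations and the fuel-0 branch (which returns the same
-- expression as the loop exit) is never reached.
def pvLoopA : Nat → List Char → Int → Int → Int → Int → String
  | 0, _, rc, _, _, _ => if rc > 0 then "Radiant" else "Dire"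
  | fuel+1, q, rc, dc, rf, df =>
    if rc > 0 ∧ dc > 0 then
      match q with
      | [] => if rc > 0 then "Radiant" else "Dire"  -- queue.popleft() on []: unreachable (the queue always holds rc 'R's)
      | current :: rest =>
        if current = 'R' then
          if df > 0 then pvLoopA fuel rest (rc - 1) dc rf (df - 1)
          else pvLoopA fuel (rest ++ ['R']) rc dc (rf + 1) df
        else
          if rf > 0 then pvLoopA fuel rest rc (dc - 1) (rf - 1) df
          else pvLoopA fuel (rest ++ ['D']) rc dc rf (df + 1)
    else if rc > 0 then "Radiant" else "Dire"

def predictPartyVictory_circular_queue (senate : String) : String :=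
  pvLoopA (2 * senate.toList.length + 1) senate.toList
    ((PySem.Str.count senate "R" : Nat) : Int) ((PySem.Str.count senate "D" : Nat) : Int) 0 0

-- ===== PORT B =====
-- needed by pvLoopB's decreasing_by (a successful list.remove shortens the list)
theorem pvRemoveSomeLength {xs ys : List Char} {v : Char}
    (h : PySem.List.remove? xs v = some ys) : ys.length < xs.length := by
  by_cases hv : v ∈ xs
  · rw [PySem.List.remove?_eq_some_erase xs v hv] at h
    cases h
    rw [List.length_erase_of_mem hv]
    exact Nat.sub_lt (List.length_pos_of_mem hv) Nat.one_pos
  · rw [(PySem.List.remove?_eq_none_iff xs v).mpr hv] at h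
    cases h

-- B's while loop on the list of alive senators
def pvLoopB (s : List Char) : String :=
  if 'R' ∈ s ∧ 'D' ∈ s then
    match s with
    | [] => "Dire"       -- alive.pop(0) on []: unreachable under the gate
    | head :: t =>
      match h : PySem.List.remove? t (if head = 'R' then 'D' else 'R') with
      | none => "Dire"   -- list.remove raising ValueError: unreachable under the gate
      | some t' => pvLoopB (t' ++ [head])
  else if 'R' ∈ s then "Radiant" else "Dire"
termination_by s.length
decreasing_by
  have := pvRemoveSomeLength h
  simp only [List.length_append, List.length_cons, List.length_nil]
  omega

def predictPartyVictory_circular_queue_alt (senate : String) : String :=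
  pvLoopB senate.toList

-- ===== PRECONDITION & SPEC =====
-- Pre_ restricts to the task's natural domain: senates made of the two party letters only,
-- plus any string in which one of the two parties is absent (there A returns before reading
-- the queue).  It excludes strings that mix both parties with foreign characters, where A's
-- else-branch lets every foreign character act and die as a Dire senator while the loop gate
-- counts only real Dire letters — an accident of A's implementation not worth matching.
def Pre_predictPartyVictory_circular_queue (senate : String) : Prop :=
  (senate.toList.all (fun c => c == 'R' || c == 'D') = true) ∨
    senate.toList.count 'R' = 0 ∨ senate.toList.count 'D' = 0
instance (senate : String) : Decidable (Pre_predictPartyVictory_circular_queue senate) := by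
  unfold Pre_predictPartyVictory_circular_queue; infer_instance

def pvWitness_predictPartyVictory_circular_queue : String := "RDD"

def Spec_predictPartyVictory_circular_queue (senate : String) (out : String) : Prop :=
  out = predictPartyVictory_circular_queue_alt senate
instance (senate : String) (out : String) : Decidable (Spec_predictPartyVictory_circular_queue senate out) := by
  unfold Spec_predictPartyVictory_circular_queue; infer_instance

-- ===== CLAIM (what is proved, stated in full; the proofs are below) =====
def Claim_equal_predictPartyVictory_circular_queue : Prop :=
  ∀ (senate : String), Dom_predictPartyVictory_circular_queue senate →
    Pre_predictPartyVictory_circular_queue senate →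
    Spec_predictPartyVictory_circular_queue senate (predictPartyVictory_circular_queue senate)

-- ===== LEMMAS AND PROOFS =====

-- senate.count('R') is the plain character count of 'R'
theorem pvCountGo (c : Char) : ∀ (fuel : Nat) (l : List Char) (acc : Nat),
    l.length ≤ fuel → PySem.Chars.count.go [c] fuel l acc = acc + l.count c := by
  intro fuel
  induction fuel with
  | zero =>
    intro l acc h
    have hl : l = [] := List.eq_nil_of_length_eq_zero (Nat.le_zero.mp h)
    subst hl; simp [PySem.Chars.count.go]
  | succ n ih =>
    intro l acc h
    cases l with
    | nil => simp [PySem.Chars.count.go]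
    | cons x t =>
      rw [PySem.Chars.count.go]
      by_cases hx : c = x
      · subst hx
        simp only [List.isPrefixOf, BEq.rfl, Bool.true_and, if_true]
        rw [ih _ _ (by simpa using Nat.le_of_succ_le_succ h)]
        simp
        omega
      · have hpref : ([c].isPrefixOf (x :: t)) = false := by
          simp [List.isPrefixOf]; exact fun hh => hx hh
        rw [hpref]
        simp only [Bool.false_eq_true, if_false]
        rw [ih _ _ (by simpa using Nat.le_of_succ_le_succ h)]
        simp [Ne.symm hx]

theorem pvStrCount (s : String) (c : Char) :
    PySem.Str.count s (String.ofList [c]) = s.toList.count c := by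
  have h1 : PySem.Str.count s (String.ofList [c]) = PySem.Chars.count s.toList [c] := by
    simp [PySem.Str.count_eq]
  rw [h1, PySem.Chars.count]
  simp only [List.isEmpty, Bool.false_eq_true, if_false]
  rw [pvCountGo c _ _ 0 le_rfl]
  simp

-- dropOcc q c n : q with its first n occurrences of c removed (the "alive view" of A's
-- queue: pending floating bans kill the first occurrences of the opposing party)
def dropOcc : List Char → Char → Nat → List Char
  | q, _, 0 => q
  | [], _, _+1 => []
  | h :: t, c, n+1 => if h = c then dropOcc t c n else h :: dropOcc t c (n+1)

theorem dropOcc_zero (q : List Char) (c : Char) : dropOcc q c 0 = q := by cases q <;> rfl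

theorem dropOcc_nil (c : Char) (n : Nat) : dropOcc [] c n = [] := by cases n <;> rfl

theorem dropOcc_cons_self (t : List Char) (c : Char) (n : Nat) :
    dropOcc (c :: t) c (n+1) = dropOcc t c n := by simp [dropOcc]

theorem dropOcc_cons_ne {h c : Char} (t : List Char) (n : Nat) (hne : h ≠ c) :
    dropOcc (h :: t) c (n+1) = h :: dropOcc t c (n+1) := by simp [dropOcc, hne]

theorem dropOcc_cons_ne' {h c : Char} (t : List Char) (n : Nat) (hne : h ≠ c) :
    dropOcc (h :: t) c n = h :: dropOcc t c n := by
  cases n with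
  | zero => rw [dropOcc_zero, dropOcc_zero]
  | succ m => exact dropOcc_cons_ne t m hne

theorem dropOcc_append_ne {x c : Char} (hne : x ≠ c) :
    ∀ (q : List Char) (n : Nat), dropOcc (q ++ [x]) c n = dropOcc q c n ++ [x] := by
  intro q
  induction q with
  | nil =>
    intro n
    cases n with
    | zero => simp [dropOcc_zero]
    | succ m => simp [dropOcc, hne, dropOcc_zero]
  | cons h t ih =>
    intro n
    cases n with
    | zero => simp [dropOcc_zero]
    | succ m =>
      by_cases hh : h = c
      · subst hh; simp only [List.cons_append, dropOcc_cons_self]; exact ih m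
      · simp only [List.cons_append, dropOcc_cons_ne _ _ hh]; rw [ih (m+1)]

theorem count_dropOcc_self (c : Char) :
    ∀ (q : List Char) (n : Nat), (dropOcc q c n).count c = q.count c - n := by
  intro q
  induction q with
  | nil => intro n; cases n <;> simp [dropOcc_zero, dropOcc]
  | cons h t ih =>
    intro n
    cases n with
    | zero => simp [dropOcc_zero]
    | succ m =>
      by_cases hh : h = c
      · subst hh; rw [dropOcc_cons_self]; rw [ih m]; simp [List.count_cons]
      · rw [dropOcc_cons_ne _ _ hh]; simp [List.count_cons, hh, ih (m+1)]

theorem count_dropOcc_other {c c' : Char} (hne : c' ≠ c) :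
    ∀ (q : List Char) (n : Nat), (dropOcc q c n).count c' = q.count c' := by
  intro q
  induction q with
  | nil => intro n; cases n <;> simp [dropOcc_zero, dropOcc]
  | cons h t ih =>
    intro n
    cases n with
    | zero => simp [dropOcc_zero]
    | succ m =>
      by_cases hh : h = c
      · subst hh; rw [dropOcc_cons_self, ih m]; simp [List.count_cons, Ne.symm hne]
      · rw [dropOcc_cons_ne _ _ hh]; simp [List.count_cons]; rw [ih (m+1)]

theorem mem_dropOcc_self (c : Char) (q : List Char) (n : Nat) :
    c ∈ dropOcc q c n ↔ n < q.count c := by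
  rw [← List.count_pos_iff, count_dropOcc_self]; omega

theorem mem_dropOcc_other {c c' : Char} (hne : c' ≠ c) (q : List Char) (n : Nat) :
    c' ∈ dropOcc q c n ↔ c' ∈ q := by
  rw [← List.count_pos_iff, count_dropOcc_other hne, List.count_pos_iff]

theorem remove?_dropOcc (c : Char) :
    ∀ (q : List Char) (n : Nat), n < q.count c →
      PySem.List.remove? (dropOcc q c n) c = some (dropOcc q c (n+1)) := by
  intro q
  induction q with
  | nil => intro n h; simp at h
  | cons h t ih =>
    intro n hn
    cases n with
    | zero =>
      rw [dropOcc_zero]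
      by_cases hh : h = c
      · subst hh; rw [dropOcc_cons_self, dropOcc_zero]; simp
      · have hcnt : 0 < t.count c := by
          simp only [List.count_cons] at hn
          simp [hh] at hn
          exact List.count_pos_iff.mpr hn
        have h0 := ih 0 hcnt
        rw [dropOcc_zero] at h0
        rw [PySem.List.remove?_cons_of_ne _ (by exact hh), h0]
        rw [dropOcc_cons_ne _ _ hh]
        rfl
    | succ m =>
      by_cases hh : h = c
      · subst hh
        rw [dropOcc_cons_self, dropOcc_cons_self]
        exact ih m (by simp [List.count_cons] at hn; omega)
      · rw [dropOcc_cons_ne _ _ hh, dropOcc_cons_ne _ _ hh]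
        have hcnt : m + 1 < t.count c := by
          simp only [List.count_cons] at hn
          simp [hh] at hn
          exact hn
        rw [PySem.List.remove?_cons_of_ne _ (by exact hh), ih (m+1) hcnt]
        rfl

-- pvLoopB unfoldings
theorem pvLoopB_exit {s : List Char} (h : ¬('R' ∈ s ∧ 'D' ∈ s)) :
    pvLoopB s = if 'R' ∈ s then "Radiant" else "Dire" := by
  rw [pvLoopB.eq_def]; simp [h]

theorem pvLoopB_step {head : Char} {t t' : List Char}
    (hR : 'R' ∈ head :: t) (hD : 'D' ∈ head :: t)
    (h : PySem.List.remove? t (if head = 'R' then 'D' else 'R') = some t') :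
    pvLoopB (head :: t) = pvLoopB (t' ++ [head]) := by
  rw [pvLoopB.eq_def]
  simp only [hR, hD, and_self, if_true]
  split
  · simp_all
  · rename_i t'' heq; rw [h] at heq; cases heq; rfl

-- one unfolding of A's loop (plain rfl: the recursion is structural in fuel)
theorem pvLoopA_step (n : Nat) (cur : Char) (t : List Char) (rc dc rf df : Int) :
    pvLoopA (n+1) (cur :: t) rc dc rf df =
      if rc > 0 ∧ dc > 0 then
        (if cur = 'R' then
          if df > 0 then pvLoopA n t (rc - 1) dc rf (df - 1)
          else pvLoopA n (t ++ ['R']) rc dc (rf + 1) df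
         else
          if rf > 0 then pvLoopA n t rc (dc - 1) (rf - 1) df
          else pvLoopA n (t ++ ['D']) rc dc rf (df + 1))
      else if rc > 0 then "Radiant" else "Dire" := rfl

theorem pvLoopA_zero (q : List Char) (rc dc rf df : Int) :
    pvLoopA 0 q rc dc rf df = if rc > 0 then "Radiant" else "Dire" := rfl

theorem pvLoopA_nil (n : Nat) (rc dc rf df : Int) :
    pvLoopA (n+1) [] rc dc rf df = if rc > 0 then "Radiant" else "Dire" := by
  show (if rc > 0 ∧ dc > 0 then if rc > 0 then "Radiant" else "Dire"
        else if rc > 0 then "Radiant" else "Dire") = _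
  split_ifs <;> rfl

theorem pvLoopA_exit (fuel : Nat) (q : List Char) (rc dc rf df : Int)
    (h : ¬(rc > 0 ∧ dc > 0)) :
    pvLoopA fuel q rc dc rf df = if rc > 0 then "Radiant" else "Dire" := by
  cases fuel with
  | zero => rfl
  | succ n =>
    cases q with
    | nil => exact pvLoopA_nil n rc dc rf df
    | cons c t => rw [pvLoopA_step, if_neg h]

-- stepsR q : length of the shortest prefix of q containing every 'R' (number of loop
-- iterations A needs to pop every remaining radiant senator in the dire endgame)
def stepsR : List Char → Nat
  | [] => 0
  | h :: t => if 'R' ∈ t then stepsR t + 1 else if h = 'R' then 1 else 0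

theorem stepsR_append_ne {x : Char} (hne : x ≠ 'R') :
    ∀ (q : List Char), stepsR (q ++ [x]) = stepsR q := by
  intro q
  induction q with
  | nil => simp [stepsR, hne]
  | cons h t ih => simp [stepsR, Ne.symm hne, ih]

theorem stepsR_eq_zero_iff (q : List Char) : stepsR q = 0 ↔ 'R' ∉ q := by
  induction q with
  | nil => simp [stepsR]
  | cons h t ih =>
    by_cases hm : 'R' ∈ t
    · simp [stepsR, hm]
    · by_cases hh : h = 'R' <;> simp [stepsR, hm, hh, eq_comm]

theorem stepsR_le_length (q : List Char) : stepsR q ≤ q.length := by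
  induction q with
  | nil => simp [stepsR]
  | cons h t ih =>
    by_cases hm : 'R' ∈ t
    · simp [stepsR, hm]; omega
    · by_cases hh : h = 'R' <;> simp [stepsR, hm, hh]

-- Radiant endgame: every dire senator is a pending-ban target (rf ≥ #D) while a radiant
-- senator is alive: A ends with "Radiant".
theorem pvLoopA_endR : ∀ (fuel : Nat) (q : List Char) (rf : Nat),
    (∀ c ∈ q, c = 'R' ∨ c = 'D') → q.count 'D' ≤ rf → 1 ≤ q.count 'R' →
    pvLoopA fuel q (q.count 'R' : Int) (q.count 'D' : Int) (rf : Int) 0 = "Radiant" := by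
  intro fuel
  induction fuel with
  | zero =>
    intro q rf _ _ hcr
    rw [pvLoopA_zero, if_pos (by exact_mod_cast hcr)]
  | succ n ih =>
    intro q rf hall hcd hcr
    cases q with
    | nil => simp at hcr
    | cons h t =>
      rw [pvLoopA_step]
      by_cases hg : ((List.count 'R' (h :: t) : Int) > 0 ∧ (List.count 'D' (h :: t) : Int) > 0)
      · rw [if_pos hg]
        by_cases hh : h = 'R'
        · subst hh
          rw [if_pos rfl, if_neg (by omega)]
          have e1 : (t ++ ['R']).count 'R' = ('R' :: t).count 'R' := by
            simp [List.count_cons, List.count_append]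
          have e2 : (t ++ ['R']).count 'D' = ('R' :: t).count 'D' := by
            simp [List.count_cons, List.count_append]
          have hr := ih (t ++ ['R']) (rf + 1)
            (by intro c hc; rcases List.mem_append.mp hc with h1 | h1
                · exact hall c (List.mem_cons_of_mem _ h1)
                · simp at h1; subst h1; left; rfl)
            (by rw [e2]; omega) (by rw [e1]; omega)
          rw [e1, e2] at hr
          push_cast at hr ⊢
          exact hr
        · have hhD : h = 'D' := (hall h List.mem_cons_self).resolve_left hh
          subst hhD
          rw [if_neg (by decide)]
          have hcdt : ('D' :: t).count 'D' = t.count 'D' + 1 := by simp [List.count_cons]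
          have hrf1 : 1 ≤ rf := by omega
          rw [if_pos (by exact_mod_cast hrf1)]
          have hr := ih t (rf - 1)
            (fun c hc => hall c (List.mem_cons_of_mem _ hc))
            (by omega)
            (by simpa [List.count_cons] using hcr)
          have ecr : (t.count 'R' : Int) = (('D' :: t).count 'R' : Int) := by
            simp [List.count_cons]
          have ecd : (t.count 'D' : Int) = (('D' :: t).count 'D' : Int) - 1 := by
            rw [hcdt]; push_cast; ring
          have erf : ((rf - 1 : Nat) : Int) = (rf : Int) - 1 := by omega
          rw [ecr, ecd, erf] at hr
          exact hr
      · rw [if_neg hg, if_pos (by exact_mod_cast hcr)]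

-- Dire endgame: every radiant senator is a pending-ban target (df ≥ #R) while a dire
-- senator is alive: A ends with "Dire".
theorem pvLoopA_endD : ∀ (fuel : Nat) (q : List Char) (df : Nat),
    (∀ c ∈ q, c = 'R' ∨ c = 'D') → q.count 'R' ≤ df → 1 ≤ q.count 'D' → stepsR q ≤ fuel →
    pvLoopA fuel q (q.count 'R' : Int) (q.count 'D' : Int) 0 (df : Int) = "Dire" := by
  intro fuel
  induction fuel with
  | zero =>
    intro q df _ _ _ hsteps
    have : 'R' ∉ q := (stepsR_eq_zero_iff q).mp (Nat.le_zero.mp hsteps)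
    have hc0 : q.count 'R' = 0 := List.count_eq_zero.mpr this
    rw [pvLoopA_zero, if_neg (by rw [hc0]; omega)]
  | succ n ih =>
    intro q df hall hcr hcd hsteps
    cases q with
    | nil => rw [pvLoopA_nil, if_neg (by simp)]
    | cons h t =>
      rw [pvLoopA_step]
      by_cases hg : ((List.count 'R' (h :: t) : Int) > 0 ∧ (List.count 'D' (h :: t) : Int) > 0)
      · rw [if_pos hg]
        by_cases hh : h = 'R'
        · subst hh
          rw [if_pos rfl]
          have hcrt : ('R' :: t).count 'R' = t.count 'R' + 1 := by simp [List.count_cons]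
          have hdf1 : 1 ≤ df := by omega
          rw [if_pos (by exact_mod_cast hdf1)]
          have hsteps' : stepsR t ≤ n := by
            simp only [stepsR] at hsteps
            by_cases hm : 'R' ∈ t
            · simp [hm] at hsteps; omega
            · have : stepsR t = 0 := (stepsR_eq_zero_iff t).mpr hm
              omega
          have hr := ih t (df - 1)
            (fun c hc => hall c (List.mem_cons_of_mem _ hc))
            (by omega) (by simpa [List.count_cons] using hcd) hsteps'
          have ecr : (t.count 'R' : Int) = (('R' :: t).count 'R' : Int) - 1 := by
            rw [hcrt]; push_cast; ring
          have ecd : (t.count 'D' : Int) = (('R' :: t).count 'D' : Int) := by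
            simp [List.count_cons]
          have edf : ((df - 1 : Nat) : Int) = (df : Int) - 1 := by omega
          rw [ecr, ecd, edf] at hr
          exact hr
        · have hhD : h = 'D' := (hall h List.mem_cons_self).resolve_left hh
          subst hhD
          rw [if_neg (by decide), if_neg (by omega)]
          have e1 : (t ++ ['D']).count 'R' = ('D' :: t).count 'R' := by
            simp [List.count_cons, List.count_append]
          have e2 : (t ++ ['D']).count 'D' = ('D' :: t).count 'D' := by
            simp [List.count_cons, List.count_append]
          have hRmem : 'R' ∈ t := by
            have : 0 < ('D' :: t).count 'R' := by exact_mod_cast hg.1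
            simp [List.count_cons] at this
            exact this
          have hsteps' : stepsR (t ++ ['D']) ≤ n := by
            rw [stepsR_append_ne (by decide)]
            have hst : stepsR ('D' :: t) = stepsR t + 1 := by simp [stepsR, hRmem]
            omega
          have hr := ih (t ++ ['D']) (df + 1)
            (by intro c hc; rcases List.mem_append.mp hc with h1 | h1
                · exact hall c (List.mem_cons_of_mem _ h1)
                · simp at h1; subst h1; right; rfl)
            (by rw [e1]; simp [List.count_cons] at hcr ⊢; omega)
            (by rw [e2]; simpa [List.count_cons] using Nat.le_add_left 1 _) hsteps'
          rw [e1, e2] at hr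
          push_cast at hr ⊢
          exact hr
      · rw [if_neg hg]
        have hcr0 : (List.count 'R' (h :: t)) = 0 := by
          by_contra hcon
          exact hg ⟨by exact_mod_cast Nat.pos_of_ne_zero hcon, by exact_mod_cast hcd⟩
        rw [if_neg (by rw [hcr0]; omega)]

-- Main bisimulation: A's loop state (queue, counts, floating bans) corresponds to B's loop
-- on the alive view (queue minus the first rf 'D's and the first df 'R's).
theorem pvMain : ∀ (fuel : Nat) (q : List Char) (rf df : Nat),
    (∀ c ∈ q, c = 'R' ∨ c = 'D') →
    (rf = 0 ∨ df = 0) →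
    rf ≤ q.count 'D' → df ≤ q.count 'R' →
    (1 ≤ rf → 1 ≤ q.count 'R') → (1 ≤ df → 1 ≤ q.count 'D') →
    q.length + q.length ≤ fuel + rf + df →
    pvLoopA fuel q (q.count 'R' : Int) (q.count 'D' : Int) (rf : Int) (df : Int)
      = pvLoopB (dropOcc (dropOcc q 'D' rf) 'R' df) := by
  intro fuel
  induction fuel with
  | zero =>
    intro q rf df hall h0 hrf hdf hIr hId hfuel
    have hDlen : q.count 'D' ≤ q.length := List.count_le_length
    have hRlen : q.count 'R' ≤ q.length := List.count_le_length
    have hqnil : q = [] := by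
      apply List.eq_nil_of_length_eq_zero
      rcases h0 with h0 | h0 <;> omega
    subst hqnil
    rw [dropOcc_nil, dropOcc_nil, pvLoopA_zero, pvLoopB_exit (by simp)]
    simp
  | succ n ih =>
    intro q rf df hall h0 hrf hdf hIr hId hfuel
    by_cases hgR : 1 ≤ q.count 'R'
    case neg =>
      -- no radiant senator in the queue: A's gate is false, the alive view has no 'R'
      have hcr0 : q.count 'R' = 0 := by omega
      have hdf0 : df = 0 := by omega
      subst hdf0
      rw [pvLoopA_exit _ _ _ _ _ _ (by rw [hcr0]; simp), if_neg (by rw [hcr0]; omega)]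
      rw [dropOcc_zero]
      have hRnot : 'R' ∉ dropOcc q 'D' rf := by
        rw [mem_dropOcc_other (by decide), ← List.count_pos_iff]
        omega
      rw [pvLoopB_exit (fun hc => hRnot hc.1), if_neg hRnot]
    case pos =>
    by_cases hgD : 1 ≤ q.count 'D'
    case neg =>
      -- no dire senator in the queue: A's gate is false, the alive view has no 'D'
      have hcd0 : q.count 'D' = 0 := by omega
      have hrf0 : rf = 0 := by omega
      have hdf0 : df = 0 := by omega
      subst hrf0; subst hdf0
      rw [pvLoopA_exit _ _ _ _ _ _ (by rw [hcd0]; simp),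
          if_pos (by exact_mod_cast hgR)]
      rw [dropOcc_zero, dropOcc_zero]
      have hDnot : 'D' ∉ q := by rw [← List.count_pos_iff]; omega
      rw [pvLoopB_exit (fun hc => hDnot hc.2),
          if_pos (List.count_pos_iff.mp (by omega))]
    case pos =>
    have hgate : ((q.count 'R' : Int) > 0 ∧ (q.count 'D' : Int) > 0) :=
      ⟨by exact_mod_cast hgR, by exact_mod_cast hgD⟩
    obtain ⟨h, t, rfl⟩ : ∃ h t, q = h :: t := by
      cases q with
      | nil => simp at hgR
      | cons h t => exact ⟨h, t, rfl⟩
    rw [pvLoopA_step, if_pos hgate]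
    by_cases hh : h = 'R'
    · subst hh
      rw [if_pos rfl]
      have hcrt : ('R' :: t).count 'R' = t.count 'R' + 1 := by simp [List.count_cons]
      have hcdt : ('R' :: t).count 'D' = t.count 'D' := by simp [List.count_cons]
      by_cases hdf1 : 1 ≤ df
      · -- this radiant is a pending-ban target: zombie removal, the alive view is unchanged
        have hrf0 : rf = 0 := by rcases h0 with h0 | h0 <;> omega
        subst hrf0
        rw [if_pos (by exact_mod_cast hdf1)]
        obtain ⟨df', rfl⟩ : ∃ df', df = df' + 1 := ⟨df - 1, by omega⟩
        have hr := ih t 0 df'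
          (fun c hc => hall c (List.mem_cons_of_mem _ hc))
          (Or.inl rfl) (by omega) (by omega)
          (by omega)
          (by intro h1; have := hId (by omega); omega)
          (by simp at hfuel ⊢; omega)
        rw [dropOcc_zero] at hr
        rw [dropOcc_zero, dropOcc_cons_self]
        rw [← hr]
        have ecr : ((('R' :: t).count 'R' : Int)) - 1 = (t.count 'R' : Int) := by
          rw [hcrt]; push_cast; ring
        have edf : ((df' + 1 : Nat) : Int) - 1 = (df' : Int) := by push_cast; ring
        rw [hcdt, ecr, edf]
      · -- this radiant survives and issues a ban
        have hdf0 : df = 0 := by omega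
        subst hdf0
        rw [if_neg (by omega)]
        rw [dropOcc_zero, dropOcc_cons_ne' _ _ (by decide)]
        by_cases hlt : rf < t.count 'D'
        · -- a dire target is alive: B bans it and cycles the radiant to the back
          have hDs : 'D' ∈ dropOcc t 'D' rf := (mem_dropOcc_self 'D' t rf).mpr hlt
          rw [pvLoopB_step (head := 'R') (List.mem_cons_self)
              (List.mem_cons_of_mem _ hDs)
              (by rw [if_pos rfl]; exact remove?_dropOcc 'D' t rf hlt)]
          have e1 : (t ++ ['R']).count 'R' = ('R' :: t).count 'R' := by
            simp [List.count_cons, List.count_append]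
          have e2 : (t ++ ['R']).count 'D' = ('R' :: t).count 'D' := by
            simp [List.count_cons, List.count_append]
          have hr := ih (t ++ ['R']) (rf + 1) 0
            (by intro c hc; rcases List.mem_append.mp hc with h1 | h1
                · exact hall c (List.mem_cons_of_mem _ h1)
                · simp at h1; subst h1; left; rfl)
            (Or.inr rfl)
            (by rw [e2, hcdt]; omega) (by omega)
            (by intro _; rw [e1, hcrt]; omega) (by omega)
            (by simp at hfuel ⊢; omega)
          rw [e1, e2] at hr
          rw [dropOcc_zero, dropOcc_append_ne (by decide)] at hr
          push_cast at hr ⊢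
          exact hr
        · -- every dire senator is already a target: Radiant wins on both sides
          have hcdq : ('R' :: t).count 'D' ≤ rf + 1 := by rw [hcdt]; omega
          have hr := pvLoopA_endR n (t ++ ['R']) (rf + 1)
            (by intro c hc; rcases List.mem_append.mp hc with h1 | h1
                · exact hall c (List.mem_cons_of_mem _ h1)
                · simp at h1; subst h1; left; rfl)
            (by simp [List.count_append, List.count_cons] at hcdq ⊢; omega)
            (by simp [List.count_append, List.count_cons])
          have e1 : (t ++ ['R']).count 'R' = ('R' :: t).count 'R' := by
            simp [List.count_cons, List.count_append]
          have e2 : (t ++ ['R']).count 'D' = ('R' :: t).count 'D' := by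
            simp [List.count_cons, List.count_append]
          rw [e1, e2] at hr
          push_cast at hr ⊢
          rw [hr]
          have hDnot : 'D' ∉ 'R' :: dropOcc t 'D' rf := by
            intro hc
            rcases List.mem_cons.mp hc with h1 | h1
            · exact absurd h1 (by decide)
            · rw [mem_dropOcc_self] at h1; omega
          rw [pvLoopB_exit (fun hc => hDnot hc.2), if_pos List.mem_cons_self]
    · have hhD : h = 'D' := (hall h List.mem_cons_self).resolve_left hh
      subst hhD
      rw [if_neg (by decide)]
      have hcrt : ('D' :: t).count 'R' = t.count 'R' := by simp [List.count_cons]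
      have hcdt : ('D' :: t).count 'D' = t.count 'D' + 1 := by simp [List.count_cons]
      by_cases hrf1 : 1 ≤ rf
      · -- this dire is a pending-ban target: zombie removal, the alive view is unchanged
        have hdf0 : df = 0 := by rcases h0 with h0 | h0 <;> omega
        subst hdf0
        rw [if_pos (by exact_mod_cast hrf1)]
        obtain ⟨rf', rfl⟩ : ∃ rf', rf = rf' + 1 := ⟨rf - 1, by omega⟩
        have hr := ih t rf' 0
          (fun c hc => hall c (List.mem_cons_of_mem _ hc))
          (Or.inr rfl) (by omega) (by omega)
          (by intro h1; have := hIr (by omega); omega)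
          (by omega)
          (by simp at hfuel ⊢; omega)
        rw [dropOcc_zero] at hr
        rw [dropOcc_cons_self, dropOcc_zero]
        rw [← hr]
        have ecd : ((('D' :: t).count 'D' : Int)) - 1 = (t.count 'D' : Int) := by
          rw [hcdt]; push_cast; ring
        have erf : ((rf' + 1 : Nat) : Int) - 1 = (rf' : Int) := by push_cast; ring
        rw [hcrt, ecd, erf]
      · -- this dire survives and issues a ban
        have hrf0 : rf = 0 := by omega
        subst hrf0
        rw [if_neg (by omega)]
        rw [dropOcc_zero, dropOcc_cons_ne' _ _ (by decide)]
        by_cases hlt : df < t.count 'R'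
        · -- a radiant target is alive: B bans it and cycles the dire to the back
          have hRs : 'R' ∈ dropOcc t 'R' df := (mem_dropOcc_self 'R' t df).mpr hlt
          rw [pvLoopB_step (head := 'D')
              (List.mem_cons_of_mem _ hRs) (List.mem_cons_self)
              (by rw [if_neg (by decide)]; exact remove?_dropOcc 'R' t df hlt)]
          have e1 : (t ++ ['D']).count 'R' = ('D' :: t).count 'R' := by
            simp [List.count_cons, List.count_append]
          have e2 : (t ++ ['D']).count 'D' = ('D' :: t).count 'D' := by
            simp [List.count_cons, List.count_append]
          have hr := ih (t ++ ['D']) 0 (df + 1)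
            (by intro c hc; rcases List.mem_append.mp hc with h1 | h1
                · exact hall c (List.mem_cons_of_mem _ h1)
                · simp at h1; subst h1; right; rfl)
            (Or.inl rfl)
            (by omega) (by rw [e1, hcrt]; omega)
            (by omega)
            (by intro _; rw [e2, hcdt]; omega)
            (by simp at hfuel ⊢; omega)
          rw [e1, e2] at hr
          rw [dropOcc_zero, dropOcc_append_ne (by decide)] at hr
          push_cast at hr ⊢
          exact hr
        · -- every radiant senator is already a target: Dire wins on both sides
          have hr := pvLoopA_endD n (t ++ ['D']) (df + 1)
            (by intro c hc; rcases List.mem_append.mp hc with h1 | h1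
                · exact hall c (List.mem_cons_of_mem _ h1)
                · simp at h1; subst h1; right; rfl)
            (by simp [List.count_append, List.count_cons]; omega)
            (by simp [List.count_append, List.count_cons])
            (by rw [stepsR_append_ne (by decide)]
                have h1 := stepsR_le_length t
                have h2 : t.count 'R' ≤ t.length := List.count_le_length
                simp at hfuel
                omega)
          have e1 : (t ++ ['D']).count 'R' = ('D' :: t).count 'R' := by
            simp [List.count_cons, List.count_append]
          have e2 : (t ++ ['D']).count 'D' = ('D' :: t).count 'D' := by
            simp [List.count_cons, List.count_append]
          rw [e1, e2] at hr
          push_cast at hr ⊢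
          rw [hr]
          have hRnot : 'R' ∉ 'D' :: dropOcc t 'R' df := by
            intro hc
            rcases List.mem_cons.mp hc with h1 | h1
            · exact absurd h1 (by decide)
            · rw [mem_dropOcc_self] at h1; omega
          rw [pvLoopB_exit (fun hc => hRnot hc.1), if_neg hRnot]

-- ===== VERDICT (by name: the statement is the Claim_ definition above) =====
theorem predictPartyVictory_circular_queue_spec : Claim_equal_predictPartyVictory_circular_queue := by
  unfold Claim_equal_predictPartyVictory_circular_queue
  intro senate _ hpre
  unfold Spec_predictPartyVictory_circular_queue
  unfold predictPartyVictory_circular_queue predictPartyVictory_circular_queue_alt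
  have hR : PySem.Str.count senate "R" = senate.toList.count 'R' := pvStrCount senate 'R'
  have hD : PySem.Str.count senate "D" = senate.toList.count 'D' := pvStrCount senate 'D'
  rw [hR, hD]
  rcases hpre with hall | hcr0 | hcd0
  · have hallP : ∀ c ∈ senate.toList, c = 'R' ∨ c = 'D' := by
      intro c hc
      have := (List.all_eq_true.mp hall) c hc
      simpa using this
    have hm := pvMain (2 * senate.toList.length + 1) senate.toList 0 0 hallP
      (Or.inl rfl) (by omega) (by omega) (by omega) (by omega) (by omega)
    rw [dropOcc_zero, dropOcc_zero] at hm
    simpa using hm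
  · rw [pvLoopA_exit _ _ _ _ _ _ (by rw [hcr0]; simp), if_neg (by rw [hcr0]; omega)]
    have hRnot : 'R' ∉ senate.toList := by rw [← List.count_pos_iff]; omega
    rw [pvLoopB_exit (fun hc => hRnot hc.1), if_neg hRnot]
  · rw [pvLoopA_exit _ _ _ _ _ _ (by rw [hcd0]; simp)]
    have hDnot : 'D' ∉ senate.toList := by rw [← List.count_pos_iff]; omega
    rw [pvLoopB_exit (fun hc => hDnot hc.2)]
    by_cases hcr : 0 < senate.toList.count 'R'
    · rw [if_pos (by exact_mod_cast hcr), if_pos (List.count_pos_iff.mp hcr)]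
    · rw [if_neg (by omega), if_neg (by rw [← List.count_pos_iff]; omega)]
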